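-- pv_equiv track=rewrite | github.com/whatasame/BaekjoonHub | 백준/Bronze/18868. 멀티버스 Ⅰ/멀티버스 Ⅰ.py | solution
-- ===== SOURCE A (Python) =====
-- from itertools import combinations
--
-- def solution(planets):
--     # 랭킹 구하기 ->
--     orders = []
--     for planet in planets:
--         sorted_planet = sorted(planet)
--         orders.append([sorted_planet.index(e) for e in planet])
--
--     # 순서들의 조합으로 쌍 구하기 -> O(m^2n)
--     answer = 0
--     for case in combinations(orders, 2):
--         if case[0] == case[1]:
--             answer += 1
--
--     return answer
-- ===== SOURCE B (Python) =====
-- def solution(planets):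
--     # One pass per planet: ranks via a first-occurrence dict over the sorted
--     # values (no repeated .index scan), then group identical rank tuples in a
--     # counts dict and sum k*(k-1)//2 per group (no O(m^2) pair loop).
--     counts = {}
--     for planet in planets:
--         sp = sorted(planet)
--         first = {}
--         for i, v in enumerate(sp):
--             if v not in first:
--                 first[v] = i
--         key = tuple(first[v] for v in planet)
--         counts[key] = counts.get(key, 0) + 1
--     answer = 0
--     for k in counts.values():
--         answer += k * (k - 1) // 2
--     return answer
-- ===== Notes on version B (the rewrite author's own statement) =====
-- stated objective: faster
-- what changed: B computes each planet's rank tuple with a single first-occurrence dict pass over the sorted values instead of a repeated sorted_planet.index scan, and replaces the O(m^2) combinations loop by a counts dict of rank tuples, summing k*(k-1)//2 per group.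
import Mathlib
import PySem

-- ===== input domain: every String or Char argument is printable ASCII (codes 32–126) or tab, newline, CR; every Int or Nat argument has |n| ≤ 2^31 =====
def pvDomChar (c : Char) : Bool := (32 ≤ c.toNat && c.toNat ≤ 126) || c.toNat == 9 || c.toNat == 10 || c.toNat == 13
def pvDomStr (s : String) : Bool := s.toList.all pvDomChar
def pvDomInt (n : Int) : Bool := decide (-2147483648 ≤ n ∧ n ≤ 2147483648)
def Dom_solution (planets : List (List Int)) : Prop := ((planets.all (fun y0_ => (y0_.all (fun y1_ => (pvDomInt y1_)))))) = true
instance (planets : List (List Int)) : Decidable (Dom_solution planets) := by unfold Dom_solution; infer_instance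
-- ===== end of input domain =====

-- ===== PORT A =====
-- B replaces A's repeated sorted_planet.index scan by a first-occurrence dict and
-- A's O(m^2) pairwise comparison by grouping identical rank lists (objective: faster).
-- Port of A: ranks via sorted(planet).index(e) (always found, so .getD 0 is never used),
-- then count equal pairs over itertools.combinations(orders, 2).
def solution (planets : List (List Int)) : Int :=
  let orders := planets.foldl (fun os planet =>
    let sorted_planet := PySem.List.sorted planet (fun x => x) false
    os ++ [planet.map (fun e => (((PySem.List.index? sorted_planet e).getD 0 : Nat) : Int))]) []
  (PySem.List.combinations orders 2).foldl
    (fun answer c => if c.getD 0 [] == c.getD 1 [] then answer + 1 else answer) 0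

-- ===== PORT B =====
-- rank list of one planet: first-occurrence index dict over the sorted values
def solution_altRank (planet : List Int) : List Int :=
  let sp := PySem.List.sorted planet (fun x => x) false
  let first := (PySem.List.enumerate sp).foldl
    (fun d iv => if d.contains iv.2 then d else d.insert iv.2 iv.1) PySem.Dict.empty
  planet.map (fun v => first.getD v 0)

def solution_alt (planets : List (List Int)) : Int :=
  let counts := planets.foldl (fun d planet =>
    let key := solution_altRank planet
    d.insert key (d.getD key 0 + 1)) PySem.Dict.empty
  counts.values.foldl (fun answer k => answer + PySem.Int.floordiv (k * (k - 1)) 2) 0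

-- ===== PRECONDITION & SPEC =====
def Spec_solution (planets : List (List Int)) (out : Int) : Prop := out = solution_alt planets
instance (planets : List (List Int)) (out : Int) : Decidable (Spec_solution planets out) := by unfold Spec_solution; infer_instance

-- ===== CLAIM (what is proved, stated in full; the proofs are below) =====
def Claim_equal_solution : Prop := ∀ (planets : List (List Int)), Dom_solution planets → Spec_solution planets (solution planets)

-- ===== LEMMAS AND PROOFS =====

-- tri k = k*(k-1)//2, the per-group pair count in B
def tri (k : Int) : Int := PySem.Int.floordiv (k * (k - 1)) 2

-- A's pair count over combinations, as a countP
def pc (xs : List (List Int)) : Nat :=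
  List.countP (fun c => c.getD 0 [] == c.getD 1 []) (PySem.List.combinations xs 2)

-- B's grouped sum
def S (xs : List (List Int)) : Int :=
  ((PySem.Set.ofList xs).map (fun v => tri (List.count v xs : Int))).sum

theorem tri_succ (c : Int) : tri (c + 1) = tri c + c := by
  unfold tri
  rw [PySem.Int.floordiv_eq_ediv_of_pos (by norm_num), PySem.Int.floordiv_eq_ediv_of_pos (by norm_num)]
  have h1 : (c + 1) * (c + 1 - 1) = c * (c - 1) + c * 2 := by ring
  rw [h1, Int.add_mul_ediv_right _ _ (by norm_num : (2:Int) ≠ 0)]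

theorem tri_one : tri 1 = 0 := by decide

-- the first-occurrence fold computes index? (shifted by the enumeration start)
theorem firstFold_get? (l : List Int) :
    ∀ (k : Int) (d : PySem.Dict Int Int) (v : Int),
    ((PySem.List.enumerate l k).foldl
      (fun d iv => if d.contains iv.2 then d else d.insert iv.2 iv.1) d).get? v
    = (d.get? v).or (Option.map (fun i : Nat => k + (i : Int)) (PySem.List.index? l v)) := by
  induction l with
  | nil =>
    intro k d v
    simp [PySem.List.enumerate, PySem.List.index?_eq_idxOf?]
  | cons x t ih =>
    intro k d v
    simp only [PySem.List.enumerate, List.foldl_cons]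
    rw [ih]
    by_cases hv : x = v
    · subst hv
      rw [PySem.List.index?_cons_self]
      by_cases hc : d.contains x = true
      · have hs : (d.get? x).isSome := by
          rw [← PySem.Dict.contains_eq_isSome_get?]; exact hc
        obtain ⟨w, hw⟩ := Option.isSome_iff_exists.mp hs
        rw [if_pos hc, hw]
        simp
      · have hd : d.get? x = none := by
          cases h : d.get? x
          · rfl
          · exact absurd (by rw [PySem.Dict.contains_eq_isSome_get?, h]; rfl) hc
        have hcf : d.contains x = false := by simpa using hc
        cases h2 : PySem.List.index? t x <;>
          simp [hcf, PySem.Dict.get?_insert_self, hd]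
    · rw [PySem.List.index?_cons_of_ne t hv]
      by_cases hc : d.contains x = true
      · simp only [hc, if_true]
        cases h : d.get? v <;> cases h2 : PySem.List.index? t v <;>
          simp [h, Option.or] <;> ring
      · have hcf : d.contains x = false := by simpa using hc
        rw [show (if d.contains x = true then d else d.insert x k) = d.insert x k by
          simp [hcf], PySem.Dict.get?_insert_of_ne _ _ (fun h => hv h.symm)]
        cases h : d.get? v <;> cases h2 : PySem.List.index? t v <;>
          simp [h, Option.or] <;> ring

-- B's rank list equals A's rank list
theorem rank_eq (planet : List Int) :
    solution_altRank planet
      = planet.map (fun e =>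
          (((PySem.List.index? (PySem.List.sorted planet (fun x => x) false) e).getD 0 : Nat) : Int)) := by
  unfold solution_altRank
  apply List.map_congr_left
  intro e he
  have hmem : e ∈ PySem.List.sorted planet (fun x => x) false :=
    (PySem.List.mem_sorted _ _ _ _).mpr he
  have hidx : (PySem.List.index? (PySem.List.sorted planet (fun x => x) false) e).isSome := by
    rw [PySem.List.index?_eq_idxOf?]
    simpa [List.isSome_idxOf?] using hmem
  obtain ⟨i, hi⟩ := Option.isSome_iff_exists.mp hidx
  rw [PySem.List.index?_eq_idxOf?] at hi
  simp [PySem.Dict.getD, firstFold_get?, hi]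

-- A's pair count, one element prepended
theorem pc_cons (x : List Int) (xs : List (List Int)) :
    pc (x :: xs) = List.count x xs + pc xs := by
  unfold pc
  rw [show (2:Nat) = 1 + 1 from rfl, PySem.List.combinations_cons_succ, List.countP_append,
    PySem.List.combinations_one, List.countP_map, List.countP_map]
  have h1 : (((fun c : List (List Int) => c.getD 0 [] == c.getD 1 []) ∘ fun c => x :: c)
        ∘ fun y => [y]) = (fun y => y == x) := by
    funext y
    by_cases h : y = x
    · simp [Function.comp, List.getD, h]
    · simp [Function.comp, List.getD, h]
      exact fun hh => h hh.symm
  rw [h1, List.count]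

-- A's pair count, one element appended
theorem pc_append_singleton (xs : List (List Int)) (x : List Int) :
    pc (xs ++ [x]) = pc xs + List.count x xs := by
  induction xs with
  | nil => simp [pc, PySem.List.combinations_cons_succ, PySem.List.combinations_nil_succ,
      PySem.List.combinations_one]
  | cons y t ih =>
    rw [List.cons_append, pc_cons, pc_cons, ih]
    have hsym : ∀ (a b : List Int), (a == b) = (b == a) := by
      intro a b; by_cases h : a = b <;> simp [h, eq_comm]
    simp [List.count_append, List.count_cons, List.count_nil, hsym x y]
    split <;> omega

-- summing a map where the function changed at exactly one element of a nodup list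
theorem sum_map_eq_of_eq_except (x : List Int) (f g : List Int → Int) :
    ∀ (ys : List (List Int)), x ∈ ys → ys.Nodup →
    (∀ v ∈ ys, v ≠ x → f v = g v) →
    (ys.map f).sum = (ys.map g).sum + (f x - g x) := by
  intro ys
  induction ys with
  | nil => intro h; exact absurd h (List.not_mem_nil)
  | cons y t ih =>
    intro hx hnd hfg
    rcases List.mem_cons.mp hx with h | h
    · subst h
      have : ∀ v ∈ t, f v = g v := fun v hv =>
        hfg v (List.mem_cons_of_mem _ hv) (fun hvy => ((List.nodup_cons.mp hnd).1 (hvy ▸ hv)))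
      simp only [List.map_cons, List.sum_cons, List.map_congr_left this]
      ring
    · have hyx : y ≠ x := fun hyx => (List.nodup_cons.mp hnd).1 (hyx ▸ h)
      rw [List.map_cons, List.map_cons, List.sum_cons, List.sum_cons,
        ih h (List.nodup_cons.mp hnd).2 (fun v hv => hfg v (List.mem_cons_of_mem _ hv)),
        hfg y (List.mem_cons_self) hyx]
      ring

-- the grouped triangular sum equals A's pair count
theorem S_eq_pc : ∀ (xs : List (List Int)), S xs = (pc xs : Int) := by
  intro xs
  induction xs using List.reverseRecOn with
  | nil => simp [S, pc, PySem.List.combinations_nil_succ, PySem.Set.ofList]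
  | append_singleton t x ih =>
    rw [pc_append_singleton]
    unfold S
    rw [PySem.Set.ofList_append]
    have hupd : (PySem.Set.ofList t).update [x]
        = if (PySem.Set.ofList t).contains x then PySem.Set.ofList t
          else PySem.Set.ofList t ++ [x] := by
      simp [PySem.Set.update, PySem.Set.add, PySem.Set.ofList]
    rw [hupd]
    by_cases hx : x ∈ t
    · have hcont : (PySem.Set.ofList t).contains x = true := by
        simp [(PySem.Set.mem_ofList t x).mpr hx]
      rw [if_pos hcont]
      have hS : ((PySem.Set.ofList t).map (fun v => tri (List.count v t : Int))).sum = S t := rfl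
      have := sum_map_eq_of_eq_except x
        (fun v => tri (List.count v (t ++ [x]) : Int))
        (fun v => tri (List.count v t : Int))
        (PySem.Set.ofList t) ((PySem.Set.mem_ofList t x).mpr hx)
        (PySem.Set.nodup_ofList t)
        (fun v _ hvx => by
          simp [List.count_append, Ne.symm hvx])
      rw [this, hS, ih]
      have hcx : (List.count x (t ++ [x]) : Int) = (List.count x t : Int) + 1 := by
        simp [List.count_append]
      simp only [hcx, tri_succ]
      push_cast
      ring
    · have hcont : (PySem.Set.ofList t).contains x = false := by
        simp [PySem.Set.mem_ofList]
        exact hx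
      rw [if_neg (by rw [hcont]; simp)]
      have hmap : (PySem.Set.ofList t).map (fun v => tri (List.count v (t ++ [x]) : Int))
          = (PySem.Set.ofList t).map (fun v => tri (List.count v t : Int)) := by
        apply List.map_congr_left
        intro v hv
        have hvx : v ≠ x := fun h => hx (h ▸ (PySem.Set.mem_ofList t v).mp hv)
        simp [List.count_append, Ne.symm hvx]
      have hcx : List.count x (t ++ [x]) = 1 := by
        simp [List.count_append, List.count_eq_zero_of_not_mem hx]
      have hct : List.count x t = 0 := List.count_eq_zero_of_not_mem hx
      have hS : ((PySem.Set.ofList t).map (fun v => tri (List.count v t : Int))).sum = S t := rfl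
      rw [List.map_append, List.sum_append, hmap, hS, ih]
      simp [hcx, hct, tri_one]

-- ===== VERDICT (by name: the statement is the Claim_ definition above) =====
theorem solution_spec : Claim_equal_solution := by
  intro planets _
  unfold Spec_solution solution solution_alt
  simp only [PySem.List.foldl_append_singleton_eq_map, List.nil_append]
  -- A's orders are B's rank lists
  rw [show (planets.map (fun planet =>
        planet.map (fun e =>
          (((PySem.List.index? (PySem.List.sorted planet (fun x => x) false) e).getD 0 : Nat) : Int))))
      = planets.map solution_altRank from
    List.map_congr_left (fun p _ => (rank_eq p).symm)]
  -- A's answer loop is a countP; B's counts dict is a counter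
  rw [PySem.List.foldl_count_if]
  have hc : (planets.foldl (fun d planet =>
      d.insert (solution_altRank planet) (d.getD (solution_altRank planet) 0 + 1))
      PySem.Dict.empty)
      = PySem.Dict.counter (planets.map solution_altRank) := by
    rw [← PySem.Dict.foldl_insert_getD_add_one_eq_counter]
    rw [List.foldl_map]
  rw [hc, PySem.List.foldl_add]
  have hv : (PySem.Dict.counter (planets.map solution_altRank)).values
      = (PySem.Set.ofList (planets.map solution_altRank)).map
          (fun k => (List.count k (planets.map solution_altRank) : Int)) := by
    show (PySem.Dict.counter (planets.map solution_altRank)).items.map (fun p => p.2) = _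
    rw [PySem.Dict.items_counter, List.map_map]
    rfl
  rw [hv, List.map_map]
  have : ((PySem.Set.ofList (planets.map solution_altRank)).map
      ((fun k => PySem.Int.floordiv (k * (k - 1)) 2) ∘
        (fun k => (List.count k (planets.map solution_altRank) : Int)))).sum
      = S (planets.map solution_altRank) := rfl
  rw [this, S_eq_pc, zero_add]
  simp [pc]
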